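-- pv_equiv track=rewrite | github.com/ElianaHarriet/TDA | dinamica.py | contratar_dinamico
-- ===== SOURCE A (Python) =====
-- def contratar_dinamico(weeks, r, c):
--     if len(weeks) == 0:
--         return 0, []
--
--     memoria = [(0, []) for i in range(len(weeks))] # memoria[i] = contratar(weeks[i:], r, c)
--
--     for i in range(len(weeks)):
--         semana = weeks[i]
--
--         # si contrato a Arganzón
--         opcion1 = memoria[i - 1] if i > 0 else (0, [])
--         costo1 = opcion1[0] + semana * r
--
--         # si contrato a Fuddle
--         opcion2 = (float("inf"), [])
--         if i >= 2:
--             opcion2 = memoria[i - 3] if i - 3 >= 0 else (0, [])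
--         costo2 = opcion2[0] + c
--
--         if costo1 < costo2:
--             memoria[i] = costo1, opcion1[1] + ["A"]
--         else:
--             memoria[i] = costo2, opcion2[1] + ["FFF"]
--
--     return memoria[-1]
-- ===== SOURCE B (Python) =====
-- def contratar_dinamico(weeks, r, c):
--     n = len(weeks)
--     if n == 0:
--         return 0, []
--     # forward pass: costs + one decision backpointer per week (no list copying)
--     cost = [0] * n
--     dec = [True] * n  # True = "A" (one week), False = "FFF" (covers three weeks)
--     for i, w in enumerate(weeks):
--         c1 = (cost[i - 1] if i > 0 else 0) + w * r
--         if i >= 2: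
--             c2 = (cost[i - 3] if i >= 3 else 0) + c
--             if c1 < c2:
--                 cost[i], dec[i] = c1, True
--             else:
--                 cost[i], dec[i] = c2, False
--         else:
--             cost[i], dec[i] = c1, True
--     # reconstruct the chosen path once by backtracking
--     path = []
--     j = n - 1
--     while j >= 0:
--         if dec[j]:
--             path.append("A")
--             j -= 1
--         else:
--             path.append("FFF")
--             j -= 3
--     path.reverse()
--     return cost[n - 1], path
-- ===== Notes on version B (the rewrite author's own statement) =====
-- stated objective: faster
-- what changed: B replaces A's memo of (cost, full path list) pairs -- which copies a growing path list at every week -- by a cost array plus boolean decision backpointers, reconstructing the chosen path once by backtracking from the last week.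
import Mathlib
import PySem

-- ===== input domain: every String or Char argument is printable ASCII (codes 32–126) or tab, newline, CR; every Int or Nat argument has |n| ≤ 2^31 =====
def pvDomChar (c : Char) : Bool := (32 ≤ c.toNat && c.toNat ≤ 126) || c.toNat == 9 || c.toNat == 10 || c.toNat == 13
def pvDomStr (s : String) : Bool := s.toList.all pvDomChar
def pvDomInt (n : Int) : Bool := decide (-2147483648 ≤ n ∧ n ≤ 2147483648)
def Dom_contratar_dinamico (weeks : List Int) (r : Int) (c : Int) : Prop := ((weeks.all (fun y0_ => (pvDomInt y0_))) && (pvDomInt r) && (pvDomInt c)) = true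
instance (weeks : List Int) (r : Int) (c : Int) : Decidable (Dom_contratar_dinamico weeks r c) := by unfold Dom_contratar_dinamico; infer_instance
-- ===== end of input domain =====

-- B replaces A's per-week path copying (cost, path-list) memo by costs + boolean
-- decision backpointers with a single backtracking pass: faster (no quadratic list copying).

-- ===== PORT A =====
-- A fills memoria[0..n-1] in index order, each step reading memoria[i-1] and
-- memoria[i-3]; ported as a fold over weeks keeping the filled prefix newest-first
-- (head = memoria[i-1], getD 2 = memoria[i-3]).  Python's float("inf") cost of
-- opcion2 when i < 2 makes "costo1 < costo2" true there, so that branch is the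
-- i < 2 else-arm here (ints are never < inf equal).
def stepA (r c : Int) (acc : List (Int × List String)) (w : Int) : List (Int × List String) :=
  let i := acc.length
  let opcion1 := if i > 0 then acc.headD (0, []) else (0, [])
  let costo1 := opcion1.1 + w * r
  if i ≥ 2 then
    let opcion2 := if i ≥ 3 then acc.getD 2 (0, []) else ((0 : Int), ([] : List String))
    let costo2 := opcion2.1 + c
    if costo1 < costo2 then (costo1, opcion1.2 ++ ["A"]) :: acc
    else (costo2, opcion2.2 ++ ["FFF"]) :: acc
  else
    (costo1, opcion1.2 ++ ["A"]) :: acc   -- costo2 = +inf: costo1 < costo2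

def contratar_dinamico (weeks : List Int) (r : Int) (c : Int) : Int × List String :=
  if weeks.length = 0 then (0, [])
  else (weeks.foldl (stepA r c) []).headD (0, [])   -- memoria[-1]

-- ===== PORT B =====
-- forward pass of Source B: (cost, decision) per week, newest-first
def stepB (r c : Int) (acc : List (Int × Bool)) (w : Int) : List (Int × Bool) :=
  let i := acc.length
  let c1 := (if i > 0 then (acc.headD (0, true)).1 else 0) + w * r
  if i ≥ 2 then
    let c2 := (if i ≥ 3 then (acc.getD 2 (0, true)).1 else 0) + c
    if c1 < c2 then (c1, true) :: acc else (c2, false) :: acc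
  else (c1, true) :: acc

-- Source B's backtracking while-loop (dec in forward order, j an int that may go negative;
-- fuel = number of weeks bounds the iterations)
def backB (dec : List Bool) : Nat → Int → List String → List String
  | 0, _, path => path
  | fuel+1, j, path =>
    if j ≥ 0 then
      if dec.getD j.toNat true then backB dec fuel (j - 1) (path ++ ["A"])
      else backB dec fuel (j - 3) (path ++ ["FFF"])
    else path

def contratar_dinamico_alt (weeks : List Int) (r : Int) (c : Int) : Int × List String :=
  if weeks.length = 0 then (0, [])
  else
    let st := weeks.foldl (stepB r c) []
    let dec := (st.map Prod.snd).reverse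
    ((st.headD (0, true)).1, (backB dec weeks.length ((weeks.length : Int) - 1) []).reverse)

-- ===== PRECONDITION & SPEC =====
def Spec_contratar_dinamico (weeks : List Int) (r : Int) (c : Int) (out : Int × List String) : Prop := out = contratar_dinamico_alt weeks r c
instance (weeks : List Int) (r : Int) (c : Int) (out : Int × List String) : Decidable (Spec_contratar_dinamico weeks r c out) := by unfold Spec_contratar_dinamico; infer_instance

-- ===== CLAIM (what is proved, stated in full; the proofs are below) =====
def Claim_equal_contratar_dinamico : Prop := ∀ (weeks : List Int) (r : Int) (c : Int), Dom_contratar_dinamico weeks r c → Spec_contratar_dinamico weeks r c (contratar_dinamico weeks r c)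

-- ===== LEMMAS AND PROOFS =====

-- path A would have stored for the newest entry of a B-state (newest-first)
def recon : List (Int × Bool) → List String
  | [] => []
  | e :: rest => if e.2 then recon rest ++ ["A"] else recon (rest.drop 2) ++ ["FFF"]
  termination_by L => L.length
  decreasing_by
  all_goals simp

-- A's state reconstructed from B's state
def decorate : List (Int × Bool) → List (Int × List String)
  | [] => []
  | e :: rest => (e.1, recon (e :: rest)) :: decorate rest

theorem stepB_length (r c : Int) (acc : List (Int × Bool)) (w : Int) :
    (stepB r c acc w).length = acc.length + 1 := by
  unfold stepB; dsimp only; split_ifs <;> simp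

theorem foldlB_length (r c : Int) (ws : List Int) (L : List (Int × Bool)) :
    (ws.foldl (stepB r c) L).length = L.length + ws.length := by
  induction ws generalizing L with
  | nil => simp
  | cons w ws ih => simp [List.foldl_cons, ih, stepB_length]; omega

theorem decorate_length (L : List (Int × Bool)) : (decorate L).length = L.length := by
  induction L with
  | nil => rfl
  | cons e rest ih => simp [decorate, ih]

theorem decorate_getD (L : List (Int × Bool)) (p : Nat) (h : p < L.length) :
    (decorate L).getD p (0, []) = ((L.getD p (0, true)).1, recon (L.drop p)) := by
  induction L generalizing p with
  | nil => simp at h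
  | cons e rest ih =>
    cases p with
    | zero => simp [decorate]
    | succ q =>
      simp only [decorate, List.getD_cons_succ, List.drop_succ_cons]
      exact ih q (by simp at h; omega)

theorem stepA_decorate (r c : Int) (L : List (Int × Bool)) (w : Int) :
    stepA r c (decorate L) w = decorate (stepB r c L w) := by
  unfold stepA stepB
  dsimp only
  rw [decorate_length]
  by_cases h2 : L.length ≥ 2
  · have h0 : L.length > 0 := by omega
    simp only [if_pos h2, if_pos h0]
    obtain ⟨e, rest, rfl⟩ : ∃ e rest, L = e :: rest := by
      cases L with
      | nil => simp at h0
      | cons e rest => exact ⟨e, rest, rfl⟩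
    have hop2 : (if (e :: rest).length ≥ 3 then (decorate (e :: rest)).getD 2 (0, []) else ((0 : Int), ([] : List String)))
        = ((if (e :: rest).length ≥ 3 then ((e :: rest).getD 2 (0, true)).1 else 0), recon ((e :: rest).drop 2)) := by
      by_cases h3 : (e :: rest).length ≥ 3
      · rw [if_pos h3, if_pos h3, decorate_getD _ 2 (by omega)]
      · rw [if_neg h3, if_neg h3]
        have : (e :: rest).drop 2 = [] := by
          apply List.drop_eq_nil_of_le; omega
        simp [this, recon]
    rw [hop2]
    dsimp only [decorate, List.headD_cons]
    split_ifs <;> simp [decorate, recon]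
  · have : ¬ (decorate L).length ≥ 2 := by rw [decorate_length]; exact h2
    simp only [if_neg h2]
    by_cases h0 : L.length > 0
    · obtain ⟨e, rest, rfl⟩ : ∃ e rest, L = e :: rest := by
        cases L with
        | nil => simp at h0
        | cons e rest => exact ⟨e, rest, rfl⟩
      simp [decorate, recon]
    · have : L = [] := by cases L <;> simp_all
      subst this
      simp [decorate, recon]

theorem foldl_stepA_decorate (r c : Int) (ws : List Int) (L : List (Int × Bool)) :
    ws.foldl (stepA r c) (decorate L) = decorate (ws.foldl (stepB r c) L) := by
  induction ws generalizing L with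
  | nil => rfl
  | cons w ws ih => rw [List.foldl_cons, List.foldl_cons, stepA_decorate, ih]

theorem backB_neg (dec : List Bool) (fuel : Nat) (j : Int) (path : List String)
    (h : j < 0) : backB dec fuel j path = path := by
  cases fuel with
  | zero => rfl
  | succ f => simp [backB]; omega

theorem backB_append (L M : List Bool) (fuel : Nat) (j : Int) (path : List String)
    (h : j < (L.length : Int)) : backB (L ++ M) fuel j path = backB L fuel j path := by
  induction fuel generalizing j path with
  | zero => rfl
  | succ f ih =>
    simp only [backB]
    by_cases hj : j ≥ 0
    · rw [if_pos hj]
      have hlt : j.toNat < L.length := by omega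
      have : (L ++ M).getD j.toNat true = L.getD j.toNat true := by
        simp [List.getD, List.getElem?_append_left hlt]
      rw [this]
      split_ifs
      · exact ih _ _ (by omega)
      · exact ih _ _ (by omega)
    · rw [if_neg hj, if_neg hj]

theorem backB_recon (fuel : Nat) (D : List (Int × Bool)) (acc : List String)
    (h : D.length ≤ fuel) :
    backB ((D.map Prod.snd).reverse) fuel ((D.length : Int) - 1) acc
      = acc ++ (recon D).reverse := by
  induction fuel generalizing D acc with
  | zero =>
    have : D = [] := by cases D <;> simp_all
    subst this; simp [backB, recon]
  | succ f ih =>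
    cases D with
    | nil => simp [backB, recon]
    | cons e rest =>
      have hj : ((e :: rest).length : Int) - 1 = (rest.length : Int) := by simp
      rw [hj]
      simp only [backB, List.map_cons, List.reverse_cons]
      rw [if_pos (by positivity)]
      have hget : ((rest.map Prod.snd).reverse ++ [e.2]).getD ((rest.length : Int)).toNat true = e.2 := by
        have hl : (rest.map Prod.snd).reverse.length = rest.length := by simp
        simp [List.getD, hl]
      rw [hget]
      by_cases he : e.2 = true
      · rw [if_pos he]
        rw [backB_append _ _ _ _ _ (by simp only [List.length_reverse, List.length_map]; omega)]
        rw [ih rest (acc ++ ["A"]) (by simp at h; omega)]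
        simp [recon, he]
      · rw [if_neg he]
        have he' : e.2 = false := by simpa using he
        by_cases hr2 : rest.length ≥ 2
        · -- dec = ((rest.drop 2).map snd).reverse ++ (((rest.take 2).map snd).reverse ++ [e.2])
          have hsplit : (rest.map Prod.snd).reverse ++ [e.2]
              = ((rest.drop 2).map Prod.snd).reverse ++ (((rest.take 2).map Prod.snd).reverse ++ [e.2]) := by
            rw [← List.append_assoc, ← List.reverse_append, ← List.map_append, List.take_append_drop]
          rw [hsplit]
          have hdl : ((rest.drop 2).length : Int) = (rest.length : Int) - 2 := by
            simp [List.length_drop]; omega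
          rw [backB_append _ _ _ _ _ (by simp only [List.length_reverse, List.length_map, List.length_drop]; omega)]
          have : (rest.length : Int) - 3 = ((rest.drop 2).length : Int) - 1 := by omega
          rw [this]
          rw [ih (rest.drop 2) (acc ++ ["FFF"]) (by simp [List.length_drop] at h ⊢; omega)]
          simp [recon, he']
        · have hdrop : rest.drop 2 = [] := by apply List.drop_eq_nil_of_le; omega
          rw [backB_neg _ _ _ _ (by omega)]
          simp [recon, he', hdrop]

theorem contratar_dinamico_spec : Claim_equal_contratar_dinamico := by
  intro weeks r c _
  unfold Spec_contratar_dinamico contratar_dinamico contratar_dinamico_alt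
  by_cases hn : weeks.length = 0
  · rw [if_pos hn, if_pos hn]
  · rw [if_neg hn, if_neg hn]
    dsimp only
    have hfold : weeks.foldl (stepA r c) [] = decorate (weeks.foldl (stepB r c) []) :=
      foldl_stepA_decorate r c weeks []
    set st := weeks.foldl (stepB r c) [] with hst
    have hlen : st.length = weeks.length := by rw [hst, foldlB_length]; simp
    obtain ⟨x, rest, hx⟩ : ∃ x rest, st = x :: rest := by
      cases hc : st with
      | nil => rw [hc] at hlen; simp at hlen; omega
      | cons x rest => exact ⟨x, rest, rfl⟩
    have hback := backB_recon weeks.length st [] (by omega)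
    rw [hlen] at hback
    rw [hfold, hx]
    simp only [decorate, List.headD_cons]
    rw [← hx, hback]
    simp [hx]
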